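-- pv_equiv track=rewrite | github.com/elonmallin/advent-of-code-2021 | day04/solution.py | gen_win_positions
-- ===== SOURCE A (Python) =====
-- def gen_win_positions(size: int) -> list[int]:
--     win_positions:list[int] = []
--
--     for y in range(size):
--         row = []
--         col = []
--         for x in range(size):
--             row.append(y*size + x)
--             col.append(y + x*size)
--
--         win_positions.append(row)
--         win_positions.append(col)
--
--     return win_positions
-- ===== SOURCE B (Python) =====
-- def gen_win_positions(size: int) -> list[int]:
--     rows = [[y * size + x for x in range(size)] for y in range(size)]
--     cols = [list(c) for c in zip(*rows)]
--     win_positions = []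
--     for row, col in zip(rows, cols):
--         win_positions.append(row)
--         win_positions.append(col)
--     return win_positions
-- ===== Notes on version B (the rewrite author's own statement) =====
-- stated objective: idiomatic
-- what changed: B builds the row grid with comprehensions and obtains the columns as the transpose via zip(*rows) instead of computing each column's indices arithmetically in a nested loop, then interleaves rows and columns with one zip pass.
import Mathlib
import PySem

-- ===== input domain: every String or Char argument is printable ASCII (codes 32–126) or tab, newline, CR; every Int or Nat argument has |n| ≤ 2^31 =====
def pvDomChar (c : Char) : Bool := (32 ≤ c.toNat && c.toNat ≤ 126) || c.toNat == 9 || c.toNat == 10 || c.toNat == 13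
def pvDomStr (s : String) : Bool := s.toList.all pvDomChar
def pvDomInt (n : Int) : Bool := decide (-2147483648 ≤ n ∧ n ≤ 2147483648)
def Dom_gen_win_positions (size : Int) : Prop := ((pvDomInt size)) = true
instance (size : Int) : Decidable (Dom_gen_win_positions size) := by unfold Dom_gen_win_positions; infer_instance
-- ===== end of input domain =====

-- B builds the grid rows by comprehension and obtains the columns as the transpose (zip(*rows)),
-- interleaving rows and columns in one zip pass — a different decomposition, same cost.

-- ===== PORT A =====
def gen_win_positions (size : Int) : List (List Int) :=
  (PySem.List.pyRange 0 size 1).foldl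
    (fun win_positions y =>
      let rc := (PySem.List.pyRange 0 size 1).foldl
        (fun (p : List Int × List Int) x => (p.1 ++ [y * size + x], p.2 ++ [y + x * size]))
        ([], [])
      win_positions ++ [rc.1] ++ [rc.2])
    []

-- ===== PORT B =====
-- hand-written transposition: port of Python's zip(*rows) (exact for the lists B feeds it:
-- it stops as soon as some row is exhausted, and zip() of no rows is [])
def pvZipStar (rows : List (List Int)) : List (List Int) :=
  if rows.isEmpty then []
  else if rows.any (·.isEmpty) then []
  else (rows.map (fun r => r.headD 0)) :: pvZipStar (rows.map (fun r => r.tail))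
termination_by (rows.headD []).length
decreasing_by
  cases rows with
  | nil => simp_all
  | cons r rs =>
    cases r with
    | nil => simp_all
    | cons a as => simp

def gen_win_positions_alt (size : Int) : List (List Int) :=
  let rows := (PySem.List.pyRange 0 size 1).map
    (fun y => (PySem.List.pyRange 0 size 1).map (fun x => y * size + x))
  let cols := pvZipStar rows
  (rows.zip cols).foldl (fun win_positions rc => win_positions ++ [rc.1] ++ [rc.2]) []

-- ===== PRECONDITION & SPEC =====
def Spec_gen_win_positions (size : Int) (out : List (List Int)) : Prop := out = gen_win_positions_alt size
instance (size : Int) (out : List (List Int)) : Decidable (Spec_gen_win_positions size out) := by unfold Spec_gen_win_positions; infer_instance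

-- ===== CLAIM (what is proved, stated in full; the proofs are below) =====
def Claim_equal_gen_win_positions : Prop := ∀ (size : Int), Dom_gen_win_positions size → Spec_gen_win_positions size (gen_win_positions size)

-- ===== LEMMAS AND PROOFS =====

theorem pvRange0 (n : Int) :
    PySem.List.pyRange 0 n 1 = (List.range n.toNat).map (fun (k : Nat) => (k : Int)) := by
  rw [PySem.List.pyRange_one]
  simp only [Int.sub_zero]
  exact List.map_congr_left (fun k _ => by simp)

-- A's inner loop: the paired appends are the two maps
theorem pvPairFold {α : Type} (l : List α) (f g : α → Int) (a b : List Int) :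
    l.foldl (fun (p : List Int × List Int) x => (p.1 ++ [f x], p.2 ++ [g x])) (a, b)
      = (a ++ l.map f, b ++ l.map g) := by
  induction l generalizing a b with
  | nil => simp
  | cons x xs ih => simp [List.foldl_cons, ih, List.append_assoc]

-- appending two singletons per element is a flatMap of pairs
theorem pvInterleave {α β : Type} (l : List α) (f g : α → β) (acc : List β) :
    l.foldl (fun acc y => acc ++ [f y] ++ [g y]) acc = acc ++ l.flatMap (fun y => [f y, g y]) := by
  simp [List.append_assoc, List.flatMap_def]

-- transposing a rectangular grid of maps over ranges
theorem pvZipStar_grid (m : Nat) (hm : m ≠ 0) (n : Nat) (f : Nat → Nat → Int) :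
    pvZipStar ((List.range m).map (fun y => (List.range n).map (fun x => f y x)))
      = (List.range n).map (fun x => (List.range m).map (fun y => f y x)) := by
  induction n generalizing f with
  | zero =>
    rw [pvZipStar]
    simp [hm]
  | succ n ih =>
    have hne : ¬ ((List.range m).map (fun y => (List.range (n+1)).map (fun x => f y x))).isEmpty = true := by
      simp [List.isEmpty_iff, List.range_eq_nil, hm]
    have hnoemp : ¬ ((List.range m).map (fun y => (List.range (n+1)).map (fun x => f y x))).any (·.isEmpty) = true := by
      simp [List.isEmpty_iff, List.range_eq_nil]
    rw [pvZipStar, if_neg hne, if_neg hnoemp]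
    have hrs : List.range (n+1) = 0 :: (List.range n).map Nat.succ := List.range_succ_eq_map
    rw [hrs]
    simp only [List.map_cons]
    congr 1
    · simp [List.map_map, Function.comp_def]
    · have h1 : ((List.range m).map (fun y => f y 0 :: ((List.range n).map Nat.succ).map (fun x => f y x))).map (fun r => r.tail)
          = (List.range m).map (fun y => (List.range n).map (fun x => (fun y x => f y (x+1)) y x)) := by
        simp [List.map_map, Function.comp_def, Nat.succ_eq_add_one]
      rw [h1, ih (fun y x => f y (x+1))]
      simp [List.map_map, Function.comp_def, Nat.succ_eq_add_one]

theorem pvA_eq (size : Int) :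
    gen_win_positions size
      = (List.range size.toNat).flatMap
          (fun (y : Nat) => [(List.range size.toNat).map (fun (x : Nat) => (y : Int) * size + (x : Int)),
                     (List.range size.toNat).map (fun (x : Nat) => (y : Int) + (x : Int) * size)]) := by
  unfold gen_win_positions
  rw [pvRange0, List.foldl_map]
  simp only [List.foldl_map, pvPairFold, List.nil_append]
  rw [pvInterleave]
  simp only [List.nil_append]

theorem pvB_eq (size : Int) :
    gen_win_positions_alt size
      = (List.range size.toNat).flatMap
          (fun (y : Nat) => [(List.range size.toNat).map (fun (x : Nat) => (y : Int) * size + (x : Int)),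
                     (List.range size.toNat).map (fun (x : Nat) => (y : Int) + (x : Int) * size)]) := by
  unfold gen_win_positions_alt
  rw [pvRange0]
  simp only [List.map_map, Function.comp_def]
  rcases Nat.eq_zero_or_pos size.toNat with h | h
  · rw [h]; simp [pvZipStar]
  · rw [pvZipStar_grid size.toNat (by omega) size.toNat (fun y x => (y : Int) * size + (x : Int))]
    rw [List.zip_map', List.foldl_map]
    rw [pvInterleave]
    simp only [List.nil_append]
    refine List.flatMap_congr (fun y _ => ?_)
    congr 1
    congr 1
    exact List.map_congr_left (fun x _ => by ring)

-- ===== VERDICT (by name: the statement is the Claim_ definition above) =====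
theorem gen_win_positions_spec : Claim_equal_gen_win_positions := by
  intro size _
  unfold Spec_gen_win_positions
  rw [pvA_eq, pvB_eq]
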